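-- pv_equiv track=rewrite | github.com/pypi-data/pypi-mirror-276 | packages/typstdiff/typstdiff-1.0.0-py3-none-any.whl/typstdiff/main.py | isValidHexaCode
-- ===== SOURCE A (Python) =====
-- def isValidHexaCode(hex_string):
--     """
--     Check if a given string is a valid hexadecimal color code.
--     Parameters:
--         hex_string (str): The string to be checked.
--     Returns:
--         bool: True if the string is a valid hexadecimal color code,
--         False otherwise.
--     """
--     if (
--         hex_string.startswith("#")
--         and (len(hex_string) in {4, 7})
--         and all(c in "0123456789abcdefABCDEF" for c in hex_string[1:])
--     ):
--         return True
--     return False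
-- ===== SOURCE B (Python) =====
-- import re
--
-- _HEX_RE = re.compile(r'#(?:[0-9a-fA-F]{3}|[0-9a-fA-F]{6})')
--
-- def isValidHexaCode(hex_string):
--     return bool(_HEX_RE.fullmatch(hex_string))
-- ===== Notes on version B (the rewrite author's own statement) =====
-- stated objective: idiomatic
-- what changed: Replaces the three separate boolean tests (prefix check, length-in-{4,7}, all-chars-hex scan) with a single compiled regular-expression fullmatch of a hash sign followed by exactly three or six hex digits.
import Mathlib
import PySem

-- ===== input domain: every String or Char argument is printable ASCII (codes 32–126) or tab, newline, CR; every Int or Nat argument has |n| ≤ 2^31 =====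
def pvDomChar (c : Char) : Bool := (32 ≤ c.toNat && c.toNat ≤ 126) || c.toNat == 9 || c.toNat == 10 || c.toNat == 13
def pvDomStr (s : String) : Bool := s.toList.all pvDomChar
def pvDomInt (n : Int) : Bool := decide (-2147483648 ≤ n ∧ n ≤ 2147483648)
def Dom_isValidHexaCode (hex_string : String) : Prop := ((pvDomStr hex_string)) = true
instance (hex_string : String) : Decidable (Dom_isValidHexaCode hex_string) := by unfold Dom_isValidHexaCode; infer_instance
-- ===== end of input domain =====

-- B replaces A's three separate boolean tests with a single regex fullmatch (hash sign then three or six hex digits): idiomatic, same cost.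


-- ===== PORT A =====
-- literal port: startswith '#', length in {4,7}, every char of s[1:] in the 22-char hex alphabet
def isValidHexaCode (hex_string : String) : Bool :=
  if PySem.Str.startswith hex_string "#"
      && (PySem.Str.len hex_string == 4 || PySem.Str.len hex_string == 7)
      && (PySem.Chars.slice hex_string.toList (some 1) none).all
           (fun c => PySem.Chars.isIn [c] "0123456789abcdefABCDEF".toList)
  then true else false

-- ===== PORT B =====
-- port of the regex fullmatch r'#(?:[0-9a-fA-F]{3}|[0-9a-fA-F]{6})': literal '#', then 3 or 6 chars of the class [0-9a-fA-F]
def pvHexClass (c : Char) : Bool :=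
  ('0' ≤ c && c ≤ '9') || ('a' ≤ c && c ≤ 'f') || ('A' ≤ c && c ≤ 'F')

def isValidHexaCode_alt (hex_string : String) : Bool :=
  match hex_string.toList with
  | '#' :: rest => (rest.length == 3 || rest.length == 6) && rest.all pvHexClass
  | _ => false

-- ===== PRECONDITION & SPEC =====
def Spec_isValidHexaCode (hex_string : String) (out : Bool) : Prop := out = isValidHexaCode_alt hex_string
instance (hex_string : String) (out : Bool) : Decidable (Spec_isValidHexaCode hex_string out) := by unfold Spec_isValidHexaCode; infer_instance

-- ===== CLAIM (what is proved, stated in full; the proofs are below) =====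
def Claim_equal_isValidHexaCode : Prop := ∀ (hex_string : String), Dom_isValidHexaCode hex_string → Spec_isValidHexaCode hex_string (isValidHexaCode hex_string)

-- ===== LEMMAS AND PROOFS =====

-- pointwise-on-members congruence for List.all (List.all_congr needs the equation on every char)
lemma pv_all_congr_mem {l : List Char} {f g : Char → Bool} (h : ∀ x ∈ l, f x = g x) :
    l.all f = l.all g := by
  induction l with
  | nil => rfl
  | cons y ys ih =>
    simp only [List.all_cons, h y List.mem_cons_self,
      ih (fun x hx => h x (List.mem_cons_of_mem _ hx))]

-- membership in A's 22-char alphabet coincides with B's regex character class, for ASCII-range chars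
set_option maxRecDepth 8192 in
lemma hex_isIn_eq_class (c : Char) (h : pvDomChar c = true) :
    PySem.Chars.isIn [c] "0123456789abcdefABCDEF".toList = pvHexClass c := by
  have hlt : c.toNat < 127 := by
    simp only [pvDomChar, Bool.or_eq_true, Bool.and_eq_true, decide_eq_true_eq,
      beq_iff_eq] at h
    omega
  have key : ∀ n : Fin 127,
      PySem.Chars.isIn [Char.ofNat n.val] "0123456789abcdefABCDEF".toList
        = pvHexClass (Char.ofNat n.val) := by decide
  have := key ⟨c.toNat, hlt⟩
  rwa [Char.ofNat_toNat] at this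

-- ===== VERDICT (by name: the statement is the Claim_ definition above) =====
theorem isValidHexaCode_spec : Claim_equal_isValidHexaCode := by
  intro s hdom
  unfold Spec_isValidHexaCode isValidHexaCode isValidHexaCode_alt
  have hdom' : ∀ c ∈ s.toList, pvDomChar c = true := by
    simpa [Dom_isValidHexaCode, pvDomStr, List.all_eq_true] using hdom
  cases hs : s.toList with
  | nil =>
    simp [PySem.Str.startswith_eq, hs, PySem.Chars.startswith]
  | cons c cs =>
    by_cases hc : c = '#'
    · subst hc
      have hstart : PySem.Str.startswith s "#" = true := by
        simp only [PySem.Str.startswith_eq, hs]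
        rw [PySem.Chars.startswith_iff]
        exact ⟨cs, rfl⟩
      have hlen : PySem.Str.len s = (cs.length : Int) + 1 := by
        simp [PySem.Str.len_eq, hs]
      have hall : (PySem.Chars.slice ('#' :: cs) (some 1) none).all
            (fun x => PySem.Chars.isIn [x] "0123456789abcdefABCDEF".toList)
          = cs.all pvHexClass := by
        have hsl : PySem.Chars.slice ('#' :: cs) (some 1) none = cs := by
          simp [PySem.Chars.slice, PySem.List.slice_from]
        rw [hsl]
        exact pv_all_congr_mem (fun x hx =>
          hex_isIn_eq_class x (hdom' x (hs ▸ List.mem_cons_of_mem _ hx)))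
      have h4 : ((cs.length : Int) + 1 == 4) = (cs.length == 3) := by
        rw [Bool.eq_iff_iff, beq_iff_eq, beq_iff_eq]; omega
      have h7 : ((cs.length : Int) + 1 == 7) = (cs.length == 6) := by
        rw [Bool.eq_iff_iff, beq_iff_eq, beq_iff_eq]; omega
      rw [hall, hstart, hlen, h4, h7]
      split_ifs with h <;> simp_all
    · have hpre : ¬ ("#".toList <+: c :: cs) := by
        intro h
        obtain ⟨t, ht⟩ := h
        apply hc
        have ht' : '#' :: t = c :: cs := ht
        exact (List.cons_eq_cons.mp ht').1.symm
      have hstart : PySem.Str.startswith s "#" = false := by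
        simp only [PySem.Str.startswith_eq, hs]
        rw [Bool.eq_false_iff]
        intro hcontra
        exact hpre ((PySem.Chars.startswith_iff _ _).mp hcontra)
      rw [hstart]
      simp only [Bool.false_and]
      rw [if_neg (by simp)]
      split
      · rename_i rest heq
        exact absurd (List.cons_eq_cons.mp heq).1 hc
      · rfl
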